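-- pv_equiv track=rewrite | github.com/AdithyaReddyGeeda/Video-Action-Recognition | twitter_style_automator/style_analyzer.py | _tweets_sample_for_analysis
-- ===== SOURCE A (Python) =====
-- from typing import Any, Dict, List, Optional
--
-- def _tweets_sample_for_analysis(
--     tweets: List[dict],
--     max_tweets: int = 200,
--     max_chars_total: int = 45000,
-- ) -> str:
--     """Build a string of tweet texts for the API, respecting token limits."""
--     out: List[str] = []
--     total = 0
--     for t in tweets[:max_tweets]:
--         text = (t.get("text") or "").strip()
--         if not text:
--             continue
--         line = text[:280] + "\n"
--         if total + len(line) > max_chars_total: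
--             break
--         out.append(line)
--         total += len(line)
--     return "".join(out) if out else "No tweets available."
-- ===== SOURCE B (Python) =====
-- def _tweets_sample_for_analysis(
--     tweets,
--     max_tweets=200,
--     max_chars_total=45000,
-- ):
--     """Build a string of tweet texts for the API, respecting token limits."""
--     lines = []
--     for t in tweets[:max_tweets]:
--         s = (t.get("text") or "").strip()
--         if s:
--             lines.append(s[:280] + "\n")
--     cums = []
--     run = 0
--     for ln in lines:
--         run += len(ln)
--         cums.append(run)
--     kept = [ln for ln, c in zip(lines, cums) if c <= max_chars_total]
--     return "".join(kept) if kept else "No tweets available."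
-- ===== Notes on version B (the rewrite author's own statement) =====
-- stated objective: alternative
-- what changed: Replaces A's single fused loop (filter + running budget + break) by three separate passes: build the trimmed lines, build their cumulative length sums, then keep exactly the lines whose cumulative sum fits the budget (correct because the sums are nondecreasing, so the kept lines form the same prefix A's break produces).
import Mathlib
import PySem

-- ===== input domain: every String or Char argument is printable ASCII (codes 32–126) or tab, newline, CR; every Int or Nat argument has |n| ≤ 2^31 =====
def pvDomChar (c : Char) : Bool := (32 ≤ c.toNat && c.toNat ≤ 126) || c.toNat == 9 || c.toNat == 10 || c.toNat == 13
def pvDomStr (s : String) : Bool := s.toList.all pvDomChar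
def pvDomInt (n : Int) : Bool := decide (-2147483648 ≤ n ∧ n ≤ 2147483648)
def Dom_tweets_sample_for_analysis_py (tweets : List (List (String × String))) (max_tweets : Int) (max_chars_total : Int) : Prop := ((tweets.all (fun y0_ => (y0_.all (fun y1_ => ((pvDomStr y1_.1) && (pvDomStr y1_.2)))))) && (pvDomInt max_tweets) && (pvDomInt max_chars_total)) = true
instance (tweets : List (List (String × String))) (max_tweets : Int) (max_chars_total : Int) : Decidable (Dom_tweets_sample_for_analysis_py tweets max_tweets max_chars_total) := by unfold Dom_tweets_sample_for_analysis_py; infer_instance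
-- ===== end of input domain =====

-- B separates A's fused filter+budget+break loop into three passes (lines, cumulative sums,
-- filter by budget); equal return value proved on the whole domain. No side effects involved.

-- ===== PORT A =====
-- (t.get("text") or "").strip(): for strings, `or ""` maps None and "" both to "", which getD "" computes.
def pvA_line (t : List (String × String)) : List Char :=
  PySem.Chars.strip (((PySem.Dict.mk t).get? "text").getD "").toList

-- A's for-loop with `continue`/`break`, carrying out/total; break returns the out built so far.
def pvA_loop (M : Int) : List (List (String × String)) → List (List Char) → Int → List (List Char)
  | [], out, _ => out
  | t :: rest, out, total =>
    let text := pvA_line t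
    if text = [] then pvA_loop M rest out total
    else
      let line := PySem.List.slice text none (some 280) ++ ['\n']
      if total + (line.length : Int) > M then out
      else pvA_loop M rest (out ++ [line]) (total + (line.length : Int))

def tweets_sample_for_analysis_py (tweets : List (List (String × String))) (max_tweets : Int) (max_chars_total : Int) : String :=
  let out := pvA_loop max_chars_total (PySem.List.slice tweets none (some max_tweets)) [] 0
  if out = [] then "No tweets available." else String.ofList (PySem.Chars.join [] out)

-- ===== PORT B =====
-- pass 1: the trimmed nonempty lines
def pvB_lines : List (List (String × String)) → List (List Char)
  | [] => []
  | t :: rest =>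
    let s := PySem.Chars.strip (((PySem.Dict.mk t).get? "text").getD "").toList
    if s = [] then pvB_lines rest
    else (PySem.List.slice s none (some 280) ++ ['\n']) :: pvB_lines rest

-- pass 2: cumulative length sums
def pvB_cums (run : Int) : List (List Char) → List Int
  | [] => []
  | ln :: rest => (run + (ln.length : Int)) :: pvB_cums (run + (ln.length : Int)) rest

def tweets_sample_for_analysis_py_alt (tweets : List (List (String × String))) (max_tweets : Int) (max_chars_total : Int) : String :=
  let lines := pvB_lines (PySem.List.slice tweets none (some max_tweets))
  let cums := pvB_cums 0 lines
  let kept := ((lines.zip cums).filter (fun p => p.2 ≤ max_chars_total)).map (·.1)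
  if kept = [] then "No tweets available." else String.ofList (PySem.Chars.join [] kept)

-- ===== PRECONDITION & SPEC =====
def Spec_tweets_sample_for_analysis_py (tweets : List (List (String × String))) (max_tweets : Int) (max_chars_total : Int) (out : String) : Prop := out = tweets_sample_for_analysis_py_alt tweets max_tweets max_chars_total
instance (tweets : List (List (String × String))) (max_tweets : Int) (max_chars_total : Int) (out : String) : Decidable (Spec_tweets_sample_for_analysis_py tweets max_tweets max_chars_total out) := by unfold Spec_tweets_sample_for_analysis_py; infer_instance

-- ===== CLAIM (what is proved, stated in full; the proofs are below) =====
def Claim_equal_tweets_sample_for_analysis_py : Prop := ∀ (tweets : List (List (String × String))) (max_tweets : Int) (max_chars_total : Int), Dom_tweets_sample_for_analysis_py tweets max_tweets max_chars_total → Spec_tweets_sample_for_analysis_py tweets max_tweets max_chars_total (tweets_sample_for_analysis_py tweets max_tweets max_chars_total)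

-- ===== LEMMAS AND PROOFS =====

-- A's accumulator peels off
theorem pvA_loop_acc (M : Int) (ts : List (List (String × String))) :
    ∀ out total, pvA_loop M ts out total = out ++ pvA_loop M ts [] total := by
  induction ts with
  | nil => intro out total; simp [pvA_loop]
  | cons t rest ih =>
    intro out total
    simp only [pvA_loop]
    split_ifs with h1 h2
    · exact ih out total
    · simp
    · rw [ih (out ++ _), ih ([] ++ _)]
      simp

-- every cumulative sum is at least the starting run
theorem pvB_cums_ge (lns : List (List Char)) :
    ∀ run c, c ∈ pvB_cums run lns → run ≤ c := by
  induction lns with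
  | nil => intro run c h; simp [pvB_cums] at h
  | cons ln rest ih =>
    intro run c h
    simp only [pvB_cums, List.mem_cons] at h
    rcases h with h | h
    · omega
    · have := ih (run + (ln.length : Int)) c h; omega

-- an over-budget starting run keeps nothing
theorem pvB_filter_nil (M total : Int) (lns : List (List Char)) (h : M < total) :
    ((lns.zip (pvB_cums total lns)).filter (fun p => p.2 ≤ M)) = [] := by
  rw [List.filter_eq_nil_iff]
  intro p hp
  have := pvB_cums_ge lns total p.2 (List.of_mem_zip hp).2
  simp only [decide_eq_true_eq]
  omega

-- core: A's loop (no accumulator) equals B's filtered zip, for any starting total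
theorem pvAB (M : Int) (ts : List (List (String × String))) :
    ∀ total, pvA_loop M ts [] total =
      (((pvB_lines ts).zip (pvB_cums total (pvB_lines ts))).filter (fun p => p.2 ≤ M)).map (·.1) := by
  induction ts with
  | nil => intro total; simp [pvA_loop, pvB_lines, pvB_cums]
  | cons t rest ih =>
    intro total
    simp only [pvA_loop, pvB_lines, pvA_line]
    split_ifs with h1 h2
    · exact ih total
    · -- break: total + len > M, and every later cum is ≥ total + len > M
      rw [pvB_cums, List.zip_cons_cons, List.filter_cons,
        if_neg (by simp only [decide_eq_true_eq]; omega),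
        pvB_filter_nil M _ _ (by omega)]
      simp
    · -- keep: head fits, tail by IH at total + len
      rw [pvA_loop_acc, pvB_cums, List.zip_cons_cons, List.filter_cons,
        if_pos (by simp only [decide_eq_true_eq]; omega), List.map_cons, ih]
      simp

-- ===== VERDICT (by name: the statement is the Claim_ definition above) =====
theorem tweets_sample_for_analysis_py_spec : Claim_equal_tweets_sample_for_analysis_py := by
  intro tweets max_tweets max_chars_total _
  unfold Spec_tweets_sample_for_analysis_py tweets_sample_for_analysis_py tweets_sample_for_analysis_py_alt
  rw [pvAB]
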